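-- pv_equiv track=rewrite | github.com/FazilovDev/Diplom | models/algorithms/winnowing.py | get_hash_from_gram
-- ===== SOURCE A (Python) =====
-- def get_hash_from_gram(gram, q):
--     h = 0
--     k = 273
--
--     mod = 10 ** 9 + 7# 2**64
--     m = 1
--     for letter in gram:
--         x = ord(letter) - ord('a') + 1
--         h = (h + m * x) % mod
--         m = (m * k) % mod
--     return h
-- ===== SOURCE B (Python) =====
-- def get_hash_from_gram(gram, q):
--     h = 0
--     for letter in reversed(gram):
--         h = (h * 273 + (ord(letter) - ord('a') + 1)) % (10 ** 9 + 7)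
--     return h
-- ===== Notes on version B (the rewrite author's own statement) =====
-- stated objective: simpler
-- what changed: Replaces the two-accumulator sum-of-powers loop (running power m plus hash h) by Horner's method over the reversed gram with a single accumulator.
import Mathlib
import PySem

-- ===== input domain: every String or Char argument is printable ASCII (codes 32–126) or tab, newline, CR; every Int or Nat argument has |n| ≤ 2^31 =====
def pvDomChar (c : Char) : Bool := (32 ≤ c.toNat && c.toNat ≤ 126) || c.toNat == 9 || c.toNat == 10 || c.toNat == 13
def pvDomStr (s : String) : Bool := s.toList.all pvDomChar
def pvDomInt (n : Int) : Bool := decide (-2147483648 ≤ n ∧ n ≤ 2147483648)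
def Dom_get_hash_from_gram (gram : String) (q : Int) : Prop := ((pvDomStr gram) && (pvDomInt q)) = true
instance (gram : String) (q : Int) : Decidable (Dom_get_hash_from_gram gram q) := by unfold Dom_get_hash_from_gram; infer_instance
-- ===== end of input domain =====

-- B replaces A's two-accumulator (hash, running power) loop by Horner's method over the
-- reversed gram with a single accumulator; objective: simpler.

-- ===== PORT A =====
-- state is (h, m), exactly A's two accumulators
def get_hash_from_gram (gram : String) (q : Int) : Int :=
  (gram.toList.foldl
    (fun (st : Int × Int) letter =>
      let x : Int := (letter.toNat : Int) - 97 + 1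
      ((st.1 + st.2 * x) % (10 ^ 9 + 7), (st.2 * 273) % (10 ^ 9 + 7)))
    (0, 1)).1

-- ===== PORT B =====
def get_hash_from_gram_alt (gram : String) (q : Int) : Int :=
  gram.toList.reverse.foldl
    (fun h letter => (h * 273 + ((letter.toNat : Int) - 97 + 1)) % (10 ^ 9 + 7))
    0

-- ===== PRECONDITION & SPEC =====
def Spec_get_hash_from_gram (gram : String) (q : Int) (out : Int) : Prop := out = get_hash_from_gram_alt gram q
instance (gram : String) (q : Int) (out : Int) : Decidable (Spec_get_hash_from_gram gram q out) := by unfold Spec_get_hash_from_gram; infer_instance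

-- ===== CLAIM (what is proved, stated in full; the proofs are below) =====
def Claim_equal_get_hash_from_gram : Prop := ∀ (gram : String) (q : Int), Dom_get_hash_from_gram gram q → Spec_get_hash_from_gram gram q (get_hash_from_gram gram q)

-- ===== LEMMAS AND PROOFS =====

-- the exact (un-reduced) polynomial Σ x_i · 273^i both loops compute modulo 10^9+7
def pvPoly (l : List Char) : Int :=
  l.foldr (fun c acc => ((c.toNat : Int) - 96) + 273 * acc) 0

theorem pvA_inv (l : List Char) (h m : Int) (hh : h % (10 ^ 9 + 7) = h) :
    (l.foldl
      (fun (st : Int × Int) letter =>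
        let x : Int := (letter.toNat : Int) - 97 + 1
        ((st.1 + st.2 * x) % (10 ^ 9 + 7), (st.2 * 273) % (10 ^ 9 + 7)))
      (h, m)).1 = (h + m * pvPoly l) % (10 ^ 9 + 7) := by
  induction l generalizing h m with
  | nil =>
    simp [pvPoly]
    omega
  | cons c l ih =>
    simp only [List.foldl_cons]
    rw [ih _ _ (Int.emod_emod_of_dvd _ dvd_rfl)]
    have e1 : (h + m * ((c.toNat : Int) - 97 + 1)) % (10 ^ 9 + 7)
        ≡ h + m * ((c.toNat : Int) - 97 + 1) [ZMOD (10 ^ 9 + 7)] :=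
      Int.emod_emod_of_dvd _ dvd_rfl
    have e2 : (m * 273) % (10 ^ 9 + 7) ≡ m * 273 [ZMOD (10 ^ 9 + 7)] :=
      Int.emod_emod_of_dvd _ dvd_rfl
    have := e1.add (e2.mul_right (pvPoly l))
    refine this.trans ?_
    show _ % _ = _ % _
    congr 1
    simp [pvPoly]
    ring

theorem pvB_eq (l : List Char) :
    l.foldr (fun letter h => (h * 273 + ((letter.toNat : Int) - 97 + 1)) % (10 ^ 9 + 7)) 0
      = pvPoly l % (10 ^ 9 + 7) := by
  induction l with
  | nil => simp [pvPoly]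
  | cons c l ih =>
    simp only [List.foldr_cons, ih]
    have e : pvPoly l % (10 ^ 9 + 7) ≡ pvPoly l [ZMOD (10 ^ 9 + 7)] :=
      Int.emod_emod_of_dvd _ dvd_rfl
    have := (e.mul_right 273).add_right ((c.toNat : Int) - 97 + 1)
    refine this.trans ?_
    show _ % _ = _ % _
    congr 1
    simp [pvPoly]
    ring

-- ===== VERDICT (by name: the statement is the Claim_ definition above) =====
theorem get_hash_from_gram_spec : Claim_equal_get_hash_from_gram := by
  intro gram q _
  unfold Spec_get_hash_from_gram get_hash_from_gram get_hash_from_gram_alt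
  rw [List.foldl_reverse, pvA_inv _ 0 1 rfl, pvB_eq]
  simp
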